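-- pv_equiv track=rewrite | github.com/mohshammasi/KAUST-CS249 | Chapter-7/GraphToGenome_section12.py | graph_to_genome
-- ===== SOURCE A (Python) =====
-- from math import ceil
--
-- def cycle_to_chromosome(cycle):
--     n = ceil(len(cycle)/2)
--     chromosome = []
--     for j in range(1, n):
--         if cycle[2*j-1] < cycle[2*j]:
--             chromosome.append(int(cycle[2*j]/2))
--         else:
--             chromosome.append(int(-cycle[2*j-1]/2))
--     return chromosome
--
-- def graph_to_genome(edges):
--     # First get the cycles from the colored edges
--     cycles = []
--     cycle = []
--     for edge in edges:
--         if edge[0] < edge[1]: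
--             cycle.append(edge[0])
--             cycle.append(edge[1])
--         else:
--             cycle.append(edge[0])
--             cycle.insert(0, edge[1])
--             cycles.append(cycle)
--             cycle = []
--
--     p = []
--     for cycle in cycles:
--         cycle.insert(0, 0) # pad coz indexing starts at 1
--         chromosome = cycle_to_chromosome(cycle)
--         p.append(chromosome)
--     return p
-- ===== SOURCE B (Python) =====
-- def _half(x):
--     # truncating halving (= int(x/2) for the integers here)
--     return x // 2 if x >= 0 else -((-x) // 2)
--
-- def _entry(a, b):
--     return _half(b) if a < b else _half(-a)
--
-- def graph_to_genome(edges):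
--     # Streaming conversion with O(1) cycle state: no node/edge lists per cycle,
--     # no ceil indexing, no post-loop. Each chromosome entry is emitted as soon
--     # as its two endpoints are known (previous edge's second endpoint vs the
--     # current edge's first), and the head entry -- pairing the closing edge's
--     # second endpoint with the cycle's first node -- is prepended at close.
--     p = []
--     state = None  # (first, prev2, tail) of the open cycle, or None
--     for u, v in edges:
--         if state is None:
--             if u >= v:
--                 p.append([_entry(v, u)])
--             else:
--                 state = (u, v, [])
--         else:
--             first, prev2, tail = state
--             tail.append(_entry(prev2, u))
--             if u >= v:
--                 p.append([_entry(v, first)] + tail)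
--                 state = None
--             else:
--                 state = (first, v, tail)
--     return p
-- ===== Notes on version B (the rewrite author's own statement) =====
-- stated objective: alternative
-- what changed: B streams the genome in one fused pass with O(1) per-cycle state (first node, previous edge's second endpoint, and the entries emitted so far), appending each chromosome entry the moment its endpoint pair is known and prepending the closing entry when the cycle closes, instead of A's staged approach of materialising each cycle's flattened node list with insert(0,..), zero-padding it and converting it in a separate ceil-indexed post-loop.
import Mathlib
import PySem

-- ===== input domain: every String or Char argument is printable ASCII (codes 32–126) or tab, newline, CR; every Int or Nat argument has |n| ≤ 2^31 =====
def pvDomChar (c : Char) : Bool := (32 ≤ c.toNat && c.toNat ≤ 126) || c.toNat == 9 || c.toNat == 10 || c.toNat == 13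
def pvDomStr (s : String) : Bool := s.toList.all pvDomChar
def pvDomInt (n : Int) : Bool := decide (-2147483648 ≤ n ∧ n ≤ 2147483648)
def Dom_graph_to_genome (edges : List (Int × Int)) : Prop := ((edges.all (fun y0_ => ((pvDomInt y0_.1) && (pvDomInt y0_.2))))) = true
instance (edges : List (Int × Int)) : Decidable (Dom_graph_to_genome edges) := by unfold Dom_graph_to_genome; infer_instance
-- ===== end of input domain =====

-- B streams the genome in one fused pass with O(1) per-cycle state instead of A's
-- staged node-list materialisation and ceil-indexed post-loop; alternative decomposition, same cost.

-- ===== PORT A =====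
-- Helper of A. ceil(len/2) on a Nat length is (len+1)/2 exactly.
-- int(x/2) is truncating division, exact for |x| ≤ 2^31 < 2^53: Int.tdiv x 2.
-- Indices 2*j-1 and 2*j are in range for every call graph_to_genome makes
-- (padded cycle has odd length 2k+1 and j ≤ k), so List.getD's default is never used.
def cycle_to_chromosome (cycle : List Int) : List Int :=
  let n : Nat := (cycle.length + 1) / 2
  (List.range' 1 (n - 1)).foldl
    (fun chromosome j =>
      if cycle.getD (2*j-1) 0 < cycle.getD (2*j) 0 then
        chromosome ++ [(cycle.getD (2*j) 0).tdiv 2]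
      else
        chromosome ++ [(-(cycle.getD (2*j-1) 0)).tdiv 2]) []

def graph_to_genome (edges : List (Int × Int)) : List (List Int) :=
  let st := edges.foldl
    (fun (st : List (List Int) × List Int) edge =>
      if edge.1 < edge.2 then (st.1, st.2 ++ [edge.1, edge.2])
      else (st.1 ++ [edge.2 :: (st.2 ++ [edge.1])], []))
    ([], [])
  st.1.foldl (fun p cycle => p ++ [cycle_to_chromosome ((0 : Int) :: cycle)]) []

-- ===== PORT B =====
-- _half: Python 'x // 2 if x >= 0 else -((-x) // 2)'
def ghalf (x : Int) : Int := if x ≥ 0 then PySem.Int.floordiv x 2 else -(PySem.Int.floordiv (-x) 2)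
-- _entry
def gentry (a b : Int) : Int := if a < b then ghalf b else ghalf (-a)

def graph_to_genome_alt (edges : List (Int × Int)) : List (List Int) :=
  (edges.foldl
    (fun (st : List (List Int) × Option (Int × Int × List Int)) e =>
      match st.2 with
      | none =>
          if e.1 ≥ e.2 then (st.1 ++ [[gentry e.2 e.1]], none)
          else (st.1, some (e.1, e.2, []))
      | some (first, prev2, tail) =>
          let tail' := tail ++ [gentry prev2 e.1]
          if e.1 ≥ e.2 then (st.1 ++ [gentry e.2 first :: tail'], none)
          else (st.1, some (first, e.2, tail')))
    ([], none)).1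

-- ===== PRECONDITION & SPEC =====
def Spec_graph_to_genome (edges : List (Int × Int)) (out : List (List Int)) : Prop := out = graph_to_genome_alt edges
instance (edges : List (Int × Int)) (out : List (List Int)) : Decidable (Spec_graph_to_genome edges out) := by unfold Spec_graph_to_genome; infer_instance

-- ===== CLAIM (what is proved, stated in full; the proofs are below) =====
def Claim_equal_graph_to_genome : Prop := ∀ (edges : List (Int × Int)), Dom_graph_to_genome edges → Spec_graph_to_genome edges (graph_to_genome edges)

-- ===== LEMMAS AND PROOFS =====

-- the common value of one chromosome entry
def gval (x y : Int) : Int := if x < y then y.tdiv 2 else (-x).tdiv 2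

theorem ghalf_eq (x : Int) : ghalf x = x.tdiv 2 := by
  unfold ghalf
  rw [PySem.Int.floordiv_eq_ediv_of_pos (by norm_num), PySem.Int.floordiv_eq_ediv_of_pos (by norm_num)]
  by_cases h : 0 ≤ x
  · rw [if_pos h, Int.tdiv_eq_ediv_of_nonneg h]
  · rw [if_neg h]
    have : x.tdiv 2 = -((-x).tdiv 2) := by
      rw [← Int.neg_tdiv]; simp
    rw [this, Int.tdiv_eq_ediv_of_nonneg (by omega)]

theorem gentry_eq (a b : Int) : gentry a b = gval a b := by
  unfold gentry gval
  rw [ghalf_eq, ghalf_eq]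

-- the chromosome of a closed cycle, by structural recursion on its edge list:
-- z is the second endpoint of the closing edge, a its first endpoint
def chromSpec (z : Int) (E : List (Int × Int)) (a : Int) : List Int :=
  match E with
  | [] => [gval z a]
  | e :: E' => gval z e.1 :: chromSpec e.2 E' a

theorem chromSpec_snoc (E : List (Int × Int)) : ∀ (z u v a : Int),
    chromSpec z (E ++ [(u, v)]) a = chromSpec z E u ++ [gval v a] := by
  induction E with
  | nil => intro z u v a; simp [chromSpec]
  | cons e E ih => intro z u v a; simp [chromSpec, ih]

-- A's in-progress node list for the open edges E
def flatE (E : List (Int × Int)) : List Int := E.flatMap (fun e => [e.1, e.2])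

theorem flatE_append (E : List (Int × Int)) (e : Int × Int) :
    flatE (E ++ [e]) = flatE E ++ [e.1, e.2] := by
  simp [flatE]

theorem ctc_map (cycle : List Int) :
    cycle_to_chromosome cycle =
      (List.range' 1 ((cycle.length + 1) / 2 - 1)).map
        (fun j => gval (cycle.getD (2*j-1) 0) (cycle.getD (2*j) 0)) := by
  unfold cycle_to_chromosome
  have h : (fun (chromosome : List Int) (j : Nat) =>
      if cycle.getD (2*j-1) 0 < cycle.getD (2*j) 0 then
        chromosome ++ [(cycle.getD (2*j) 0).tdiv 2]
      else
        chromosome ++ [(-(cycle.getD (2*j-1) 0)).tdiv 2]) =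
      (fun chromosome j => chromosome ++ [gval (cycle.getD (2*j-1) 0) (cycle.getD (2*j) 0)]) := by
    funext ch j
    unfold gval
    split <;> rfl
  rw [h, PySem.List.foldl_append_singleton_eq_map]
  rfl

theorem lemA (E : List (Int × Int)) : ∀ (z a : Int),
    cycle_to_chromosome ((0 : Int) :: z :: (flatE E ++ [a])) = chromSpec z E a := by
  induction E with
  | nil =>
      intro z a
      rw [ctc_map]
      simp [flatE, chromSpec, gval]
  | cons e E ih =>
      intro z a
      rw [ctc_map]
      have hlen : (((0 : Int) :: z :: (flatE (e :: E) ++ [a])).length + 1) / 2 - 1 = (E.length + 1) + 1 := by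
        simp [flatE]
        omega
      rw [hlen]
      have hr : List.range' 1 ((E.length + 1) + 1) = 1 :: List.range' 2 (E.length + 1) := by
        simp [List.range'_succ]
      rw [hr]
      simp only [List.map_cons]
      have hhead : gval (((0 : Int) :: z :: (flatE (e :: E) ++ [a])).getD (2*1-1) 0)
          (((0 : Int) :: z :: (flatE (e :: E) ++ [a])).getD (2*1) 0) = gval z e.1 := by
        simp [flatE]
      rw [hhead]
      have hc : flatE (e :: E) ++ [a] = e.1 :: e.2 :: (flatE E ++ [a]) := by
        simp [flatE]
      have htail : (List.range' 2 (E.length + 1)).map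
            (fun j => gval (((0 : Int) :: z :: (flatE (e :: E) ++ [a])).getD (2*j-1) 0)
              (((0 : Int) :: z :: (flatE (e :: E) ++ [a])).getD (2*j) 0)) =
          (List.range' 1 (E.length + 1)).map
            (fun j => gval (((0 : Int) :: e.2 :: (flatE E ++ [a])).getD (2*j-1) 0)
              (((0 : Int) :: e.2 :: (flatE E ++ [a])).getD (2*j) 0)) := by
        have h2 : List.range' 2 (E.length + 1) = (List.range' 1 (E.length + 1)).map (· + 1) := by
          rw [List.range'_eq_map_range, List.range'_eq_map_range, List.map_map]
          apply List.map_congr_left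
          intro k _
          simp
          omega
        rw [h2, List.map_map]
        apply List.map_congr_left
        intro j hj
        obtain ⟨i, hi, hji⟩ := List.mem_range'.mp hj
        obtain ⟨j', rfl⟩ : ∃ j', j = 1 + j' := ⟨i, by omega⟩
        simp only [Function.comp]
        have e1 : 2*(1+j'+1)-1 = 2*j'+1+1+1 := by omega
        have e2 : 2*(1+j'+1) = 2*j'+1+1+1+1 := by omega
        have e3 : 2*(1+j')-1 = 2*j'+1 := by omega
        have e4 : 2*(1+j') = 2*j'+1+1 := by omega
        rw [e1, e2, e3, e4, hc]
        simp only [List.getD_cons_succ]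
      rw [htail]
      have hl2 : (((0 : Int) :: e.2 :: (flatE E ++ [a])).length + 1) / 2 - 1 = E.length + 1 := by
        simp [flatE]
        omega
      have key : (List.range' 1 (E.length + 1)).map
            (fun j => gval (((0 : Int) :: e.2 :: (flatE E ++ [a])).getD (2*j-1) 0)
              (((0 : Int) :: e.2 :: (flatE E ++ [a])).getD (2*j) 0)) = chromSpec e.2 E a := by
        rw [← ih e.2 a, ctc_map, hl2]
      rw [key]
      rfl

-- B's fold function, with gentry replaced by the common gval (gentry_eq)
def stepB (st : List (List Int) × Option (Int × Int × List Int)) (e : Int × Int) :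
    List (List Int) × Option (Int × Int × List Int) :=
  match st.2 with
  | none =>
      if e.1 ≥ e.2 then (st.1 ++ [[gval e.2 e.1]], none)
      else (st.1, some (e.1, e.2, []))
  | some (first, prev2, tail) =>
      let tail' := tail ++ [gval prev2 e.1]
      if e.1 ≥ e.2 then (st.1 ++ [gval e.2 first :: tail'], none)
      else (st.1, some (first, e.2, tail'))

theorem alt_eq_stepB (edges : List (Int × Int)) :
    graph_to_genome_alt edges = (edges.foldl stepB ([], none)).1 := by
  unfold graph_to_genome_alt
  have : (fun (st : List (List Int) × Option (Int × Int × List Int)) (e : Int × Int) =>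
      match st.2 with
      | none =>
          if e.1 ≥ e.2 then (st.1 ++ [[gentry e.2 e.1]], none)
          else (st.1, some (e.1, e.2, []))
      | some (first, prev2, tail) =>
          let tail' := tail ++ [gentry prev2 e.1]
          if e.1 ≥ e.2 then (st.1 ++ [gentry e.2 first :: tail'], none)
          else (st.1, some (first, e.2, tail'))) = stepB := by
    funext st e
    unfold stepB
    simp only [gentry_eq]
  rw [this]

-- the state correspondence between the two folds
theorem mainfold (edges : List (Int × Int)) :
    ∀ (cycles : List (List Int)) (E : List (Int × Int))
      (st : Option (Int × Int × List Int)),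
      (E = [] ↔ st = none) →
      (∀ first prev2 tail, st = some (first, prev2, tail) →
        ∀ z a, gval z first :: (tail ++ [gval prev2 a]) = chromSpec z E a) →
    (edges.foldl stepB (cycles.map (fun c => cycle_to_chromosome ((0 : Int) :: c)), st)).1 =
    ((edges.foldl
      (fun (st : List (List Int) × List Int) edge =>
        if edge.1 < edge.2 then (st.1, st.2 ++ [edge.1, edge.2])
        else (st.1 ++ [edge.2 :: (st.2 ++ [edge.1])], []))
      (cycles, flatE E)).1).map (fun c => cycle_to_chromosome ((0 : Int) :: c)) := by
  induction edges with
  | nil =>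
      intro cycles E st _ _
      rfl
  | cons edge rest ih =>
      intro cycles E st hempty hinv
      simp only [List.foldl_cons]
      by_cases h : edge.1 < edge.2
      · have h' : ¬ (edge.1 ≥ edge.2) := not_le.mpr h
        cases st with
        | none =>
            have hE : E = [] := hempty.mpr rfl
            subst hE
            simp only [stepB, h, h', if_pos]
            have : flatE [] ++ [edge.1, edge.2] = flatE [edge] := by simp [flatE]
            rw [this]
            apply ih cycles [edge] (some (edge.1, edge.2, []))
            · simp
            · intro first prev2 tail hsome z a
              cases hsome
              simp [chromSpec]
        | some fpt =>
            obtain ⟨first, prev2, tail⟩ := fpt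
            simp only [stepB, h, h', if_pos]
            have : flatE E ++ [edge.1, edge.2] = flatE (E ++ [edge]) := (flatE_append E edge).symm
            rw [this]
            apply ih cycles (E ++ [edge]) (some (first, edge.2, tail ++ [gval prev2 edge.1]))
            · simp
            · intro f p t hsome z a
              injection hsome with hs
              injection hs with h1 hs'
              injection hs' with h2 h3
              subst h1; subst h2; subst h3
              have hE := hinv first prev2 tail rfl z edge.1
              rw [show (edge : Int × Int) = (edge.1, edge.2) from rfl, chromSpec_snoc, ← hE]
              simp
      · have h' : edge.1 ≥ edge.2 := not_lt.mp h
        cases st with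
        | none =>
            have hE : E = [] := hempty.mpr rfl
            subst hE
            simp only [stepB, h, h', if_pos]
            have hA : cycle_to_chromosome ((0 : Int) :: (edge.2 :: (flatE [] ++ [edge.1]))) = [gval edge.2 edge.1] := by
              rw [lemA]; rfl
            have : cycles.map (fun c => cycle_to_chromosome ((0 : Int) :: c)) ++ [[gval edge.2 edge.1]] =
                (cycles ++ [edge.2 :: (flatE [] ++ [edge.1])]).map (fun c => cycle_to_chromosome ((0 : Int) :: c)) := by
              simp [hA]
            rw [this]
            have hfe : ([] : List Int) = flatE [] := rfl
            rw [hfe]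
            apply ih _ [] none
            · simp
            · intro first prev2 tail hsome; cases hsome
        | some fpt =>
            obtain ⟨first, prev2, tail⟩ := fpt
            simp only [stepB, h, h', if_pos]
            have hA : cycle_to_chromosome ((0 : Int) :: (edge.2 :: (flatE E ++ [edge.1]))) =
                gval edge.2 first :: (tail ++ [gval prev2 edge.1]) := by
              rw [lemA]
              exact (hinv first prev2 tail rfl edge.2 edge.1).symm
            have : cycles.map (fun c => cycle_to_chromosome ((0 : Int) :: c)) ++
                [gval edge.2 first :: (tail ++ [gval prev2 edge.1])] =
                (cycles ++ [edge.2 :: (flatE E ++ [edge.1])]).map (fun c => cycle_to_chromosome ((0 : Int) :: c)) := by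
              simp [hA]
            rw [this]
            have hfe : ([] : List Int) = flatE [] := rfl
            rw [hfe]
            apply ih _ [] none
            · simp
            · intro first prev2 tail hsome; cases hsome

-- ===== VERDICT (by name: the statement is the Claim_ definition above) =====
theorem graph_to_genome_spec : Claim_equal_graph_to_genome := by
  intro edges _
  simp only [Spec_graph_to_genome, graph_to_genome]
  rw [PySem.List.foldl_append_singleton_eq_map, alt_eq_stepB]
  simp only [List.nil_append]
  have := mainfold edges [] [] none (by simp) (by intro _ _ _ hsome; cases hsome)
  simpa using this.symm
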